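-- pv_equiv track=rewrite | github.com/sarbjee/FastAPI-Application | app/middleware/processPrompt.py | promptResponse
-- ===== SOURCE A (Python) =====
-- def promptResponse(prompt, interest):
--     """
--     Generate personalized recommendations based on a user's prompt and selected interest area.
--
--     Parameters:
--     - prompt (str): User's text input describing what they are looking for.
--     - interest (str): User's selected interest area (e.g., "Toys", "Games").
--
--     Returns:
--     - str: A response message with recommendations or a message indicating no matches were found.
--     """
--     # Mock data for demonstration purposes
--     PRODUCT_CATALOG = [
--         {"name": "Soft Plush Teddy Bear", "category": "Baby", "description": "A cuddly teddy bear for babies and toddlers. Perfect for snuggling!", "price": 15.99, "tags": ["plush", "cute", "toy"]},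
--         {"name": "Interactive Baby Activity Gym", "category": "Baby", "description": "An engaging activity gym with hanging toys for sensory development. Keeps babies entertained for hours!", "price": 39.99, "tags": ["baby", "development", "activity"]},
--         {"name": "Educational Alphabet Blocks", "category": "Baby", "description": "Colorful alphabet blocks for early learning and fine motor skills. Helps babies learn while having fun!", "price": 24.99, "tags": ["alphabet", "educational", "blocks"]},
--         {"name": "Family Board Game Bundle", "category": "Games", "description": "A collection of classic board games for family game nights. Enjoy quality time with loved ones!", "price": 49.99, "tags": ["family", "board game", "bundle"]},
--         {"name": "Challenging 1000-Piece Puzzle", "category": "Games", "description": "A beautifully illustrated puzzle to challenge your mind. Perfect for puzzle enthusiasts!", "price": 19.99, "tags": ["puzzle", "art", "challenge"]},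
--         {"name": "Educational Science Experiment Kit", "category": "Games", "description": "Perform exciting science experiments at home with this kit. Learn while having fun!", "price": 29.99, "tags": ["science", "educational", "experiment"]},
--         {"name": "Movie Night Popcorn Maker", "category": "Entertainment", "description": "Make movie nights more enjoyable with freshly popped popcorn!", "price": 29.99, "tags": ["movie", "popcorn", "entertainment"]},
--         {"name": "Karaoke Machine", "category": "Entertainment", "description": "Sing your heart out with friends and family with this karaoke machine!", "price": 99.99, "tags": ["karaoke", "music", "entertainment"]},
--         {"name": "Outdoor Adventure Set", "category": "Entertainment", "description": "Encourage outdoor exploration and adventure with this fun set!", "price": 39.99, "tags": ["outdoor", "adventure", "fun"]},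
--         {"name": "Language Learning Book Set", "category": "Learning", "description": "Enhance language skills with this comprehensive book set for beginners.", "price": 49.99, "tags": ["language", "learning", "book"]},
--         {"name": "Mathematics Workbook", "category": "Learning", "description": "Sharpen math skills with this workbook covering various topics.", "price": 19.99, "tags": ["mathematics", "learning", "workbook"]},
--         {"name": "Seasonal Decorations Bundle", "category": "Seasonal", "description": "Get into the festive spirit with this bundle of seasonal decorations.", "price": 59.99, "tags": ["seasonal", "decorations", "festive"]},
--         {"name": "Summer Beach Toys Set", "category": "Seasonal", "description": "Have fun in the sun with these beach toys perfect for summer!", "price": 29.99, "tags": ["summer", "beach", "toys"]},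
--     ]
--
--     # Convert interest to lowercase for case-insensitive comparison
--     interest = interest.lower()
--
--     # Check if the provided interest category matches any available categories
--     available_categories = set(product["category"].lower() for product in PRODUCT_CATALOG)
--     if interest not in available_categories:
--         return "Sorry, the provided interest category is not available."
--
--     # Apply simple keyword-based recommendation logic on the product catalog
--     recommendations = []
--     keywords = prompt.lower().split()
--
--     for product in PRODUCT_CATALOG:
--         if interest.lower() == product["category"].lower() and any(keyword in product["description"].lower() for keyword in keywords):
--             recommendations.append(product)
--
--     # Generate the response based on the recommendations
--     if recommendations:
--         response = f"Based on your interest in {interest}, we recommend:\n"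
--         for item in recommendations:
--             response += f"- {item['name']}: {item['description']} (Price: ${item['price']})\n"
--     else:
--         response = "Sorry, we couldn't find any products matching your interests."
--
--     return response
-- ===== SOURCE B (Python) =====
-- def promptResponse(prompt, interest):
--     """
--     Generate personalized recommendations based on a user's prompt and selected interest area.
--     Re-implementation: groups the catalog by lowercased category once, looks up the requested
--     bucket instead of scanning the whole catalog, builds the answer lines directly and joins them.
--     """
--     PRODUCT_CATALOG = [
--         {"name": "Soft Plush Teddy Bear", "category": "Baby", "description": "A cuddly teddy bear for babies and toddlers. Perfect for snuggling!", "price": 15.99, "tags": ["plush", "cute", "toy"]},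
--         {"name": "Interactive Baby Activity Gym", "category": "Baby", "description": "An engaging activity gym with hanging toys for sensory development. Keeps babies entertained for hours!", "price": 39.99, "tags": ["baby", "development", "activity"]},
--         {"name": "Educational Alphabet Blocks", "category": "Baby", "description": "Colorful alphabet blocks for early learning and fine motor skills. Helps babies learn while having fun!", "price": 24.99, "tags": ["alphabet", "educational", "blocks"]},
--         {"name": "Family Board Game Bundle", "category": "Games", "description": "A collection of classic board games for family game nights. Enjoy quality time with loved ones!", "price": 49.99, "tags": ["family", "board game", "bundle"]},
--         {"name": "Challenging 1000-Piece Puzzle", "category": "Games", "description": "A beautifully illustrated puzzle to challenge your mind. Perfect for puzzle enthusiasts!", "price": 19.99, "tags": ["puzzle", "art", "challenge"]},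
--         {"name": "Educational Science Experiment Kit", "category": "Games", "description": "Perform exciting science experiments at home with this kit. Learn while having fun!", "price": 29.99, "tags": ["science", "educational", "experiment"]},
--         {"name": "Movie Night Popcorn Maker", "category": "Entertainment", "description": "Make movie nights more enjoyable with freshly popped popcorn!", "price": 29.99, "tags": ["movie", "popcorn", "entertainment"]},
--         {"name": "Karaoke Machine", "category": "Entertainment", "description": "Sing your heart out with friends and family with this karaoke machine!", "price": 99.99, "tags": ["karaoke", "music", "entertainment"]},
--         {"name": "Outdoor Adventure Set", "category": "Entertainment", "description": "Encourage outdoor exploration and adventure with this fun set!", "price": 39.99, "tags": ["outdoor", "adventure", "fun"]},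
--         {"name": "Language Learning Book Set", "category": "Learning", "description": "Enhance language skills with this comprehensive book set for beginners.", "price": 49.99, "tags": ["language", "learning", "book"]},
--         {"name": "Mathematics Workbook", "category": "Learning", "description": "Sharpen math skills with this workbook covering various topics.", "price": 19.99, "tags": ["mathematics", "learning", "workbook"]},
--         {"name": "Seasonal Decorations Bundle", "category": "Seasonal", "description": "Get into the festive spirit with this bundle of seasonal decorations.", "price": 59.99, "tags": ["seasonal", "decorations", "festive"]},
--         {"name": "Summer Beach Toys Set", "category": "Seasonal", "description": "Have fun in the sun with these beach toys perfect for summer!", "price": 29.99, "tags": ["summer", "beach", "toys"]},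
--     ]
--
--     interest = interest.lower()
--
--     buckets = {}
--     for product in PRODUCT_CATALOG:
--         buckets.setdefault(product["category"].lower(), []).append(product)
--
--     if interest not in buckets:
--         return "Sorry, the provided interest category is not available."
--
--     keywords = prompt.lower().split()
--     lines = [f"- {p['name']}: {p['description']} (Price: ${p['price']})\n"
--              for p in buckets[interest]
--              if any(kw in p["description"].lower() for kw in keywords)]
--
--     if not lines:
--         return "Sorry, we couldn't find any products matching your interests."
--     return f"Based on your interest in {interest}, we recommend:\n" + "".join(lines)
-- ===== Notes on version B (the rewrite author's own statement) =====
-- stated objective: alternative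
-- what changed: B groups the fixed catalog into a dict keyed by lowercased category once, replacing A's availability set plus whole-catalog scan with a per-item category equality test by a single bucket lookup, and builds the answer lines directly with a comprehension joined at the end instead of filtering into a recommendations list and then accumulating the response string.
import Mathlib
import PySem

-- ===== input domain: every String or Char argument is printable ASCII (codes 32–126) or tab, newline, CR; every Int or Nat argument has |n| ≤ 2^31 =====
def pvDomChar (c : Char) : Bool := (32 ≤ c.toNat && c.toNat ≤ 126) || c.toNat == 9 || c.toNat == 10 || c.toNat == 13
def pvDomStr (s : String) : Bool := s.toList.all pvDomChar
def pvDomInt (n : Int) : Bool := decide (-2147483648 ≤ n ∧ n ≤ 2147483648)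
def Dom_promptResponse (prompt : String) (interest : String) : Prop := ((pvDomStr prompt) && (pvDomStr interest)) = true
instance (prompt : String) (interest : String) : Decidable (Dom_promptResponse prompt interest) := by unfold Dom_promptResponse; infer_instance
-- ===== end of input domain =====

-- B replaces A's whole-catalog scan (availability set + per-item category test) by a dict grouping
-- the fixed catalog by lowercased category: one bucket lookup, then lines built and joined directly.
-- Objective: simpler/alternative (the catalog is a fixed 13-item constant; no speed claim).
-- Products carry only the fields the function reads; the float price appears only inside the
-- formatted output, so it is carried as its exact rendered string ("15.99"), which is what both
-- Pythons interpolate there.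

structure Product where
  name : String
  category : String
  description : String
  price : String
deriving DecidableEq, Repr

def pvCatalog : List Product :=
  [⟨"Soft Plush Teddy Bear", "Baby", "A cuddly teddy bear for babies and toddlers. Perfect for snuggling!", "15.99"⟩,
  ⟨"Interactive Baby Activity Gym", "Baby", "An engaging activity gym with hanging toys for sensory development. Keeps babies entertained for hours!", "39.99"⟩,
  ⟨"Educational Alphabet Blocks", "Baby", "Colorful alphabet blocks for early learning and fine motor skills. Helps babies learn while having fun!", "24.99"⟩,
  ⟨"Family Board Game Bundle", "Games", "A collection of classic board games for family game nights. Enjoy quality time with loved ones!", "49.99"⟩,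
  ⟨"Challenging 1000-Piece Puzzle", "Games", "A beautifully illustrated puzzle to challenge your mind. Perfect for puzzle enthusiasts!", "19.99"⟩,
  ⟨"Educational Science Experiment Kit", "Games", "Perform exciting science experiments at home with this kit. Learn while having fun!", "29.99"⟩,
  ⟨"Movie Night Popcorn Maker", "Entertainment", "Make movie nights more enjoyable with freshly popped popcorn!", "29.99"⟩,
  ⟨"Karaoke Machine", "Entertainment", "Sing your heart out with friends and family with this karaoke machine!", "99.99"⟩,
  ⟨"Outdoor Adventure Set", "Entertainment", "Encourage outdoor exploration and adventure with this fun set!", "39.99"⟩,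
  ⟨"Language Learning Book Set", "Learning", "Enhance language skills with this comprehensive book set for beginners.", "49.99"⟩,
  ⟨"Mathematics Workbook", "Learning", "Sharpen math skills with this workbook covering various topics.", "19.99"⟩,
  ⟨"Seasonal Decorations Bundle", "Seasonal", "Get into the festive spirit with this bundle of seasonal decorations.", "59.99"⟩,
  ⟨"Summer Beach Toys Set", "Seasonal", "Have fun in the sun with these beach toys perfect for summer!", "29.99"⟩]

-- exact Python string concatenation (s + t), kernel-transparent (Lean's own ++ on String is opaque)
def pyCat (a b : String) : String := String.ofList (a.toList ++ b.toList)

-- ===== PORT A =====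
-- f"- {name}: {description} (Price: ${price})\n"
def lineA (p : Product) : String :=
  pyCat (pyCat (pyCat (pyCat (pyCat "- " p.name) ": ") p.description) " (Price: $") (pyCat p.price ")\n")

def promptResponse (prompt : String) (interest : String) : String :=
  let interest := PySem.Str.lower interest
  let availableCategories := PySem.Set.ofList (pvCatalog.map (fun p => PySem.Str.lower p.category))
  if !(PySem.Set.contains availableCategories interest) then
    "Sorry, the provided interest category is not available."
  else
    let keywords := PySem.Str.split₀ (PySem.Str.lower prompt)
    let recommendations := pvCatalog.foldl
      (fun acc p =>
        if (PySem.Str.lower interest == PySem.Str.lower p.category)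
            && keywords.any (fun kw => PySem.Str.isIn kw (PySem.Str.lower p.description))
        then acc ++ [p] else acc) []
    if !recommendations.isEmpty then
      recommendations.foldl (fun r p => pyCat r (lineA p))
        (pyCat (pyCat "Based on your interest in " interest) ", we recommend:\n")
    else
      "Sorry, we couldn't find any products matching your interests."

-- ===== PORT B =====
-- f"- {name}: {description} (Price: ${price})\n"
def lineB (p : Product) : String :=
  pyCat (pyCat (pyCat (pyCat (pyCat "- " p.name) ": ") p.description) " (Price: $") (pyCat p.price ")\n")

-- buckets.setdefault(cat, []).append(p), modelled as read-extend-insert on the Dict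
def pvBuckets : PySem.Dict String (List Product) :=
  pvCatalog.foldl
    (fun d p =>
      PySem.Dict.insert d (PySem.Str.lower p.category)
        ((PySem.Dict.getD d (PySem.Str.lower p.category) []) ++ [p]))
    PySem.Dict.empty

def promptResponse_alt (prompt : String) (interest : String) : String :=
  let il := PySem.Str.lower interest
  match PySem.Dict.get? pvBuckets il with
  | none => "Sorry, the provided interest category is not available."
  | some bucket =>
    let keywords := PySem.Str.split₀ (PySem.Str.lower prompt)
    let lines :=
      (bucket.filter (fun p =>
        keywords.any (fun kw => PySem.Str.isIn kw (PySem.Str.lower p.description)))).map lineB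
    if lines.isEmpty then
      "Sorry, we couldn't find any products matching your interests."
    else
      pyCat (pyCat (pyCat "Based on your interest in " il) ", we recommend:\n")
        (PySem.Str.join "" lines)

-- ===== PRECONDITION & SPEC =====
def Spec_promptResponse (prompt : String) (interest : String) (out : String) : Prop := out = promptResponse_alt prompt interest
instance (prompt : String) (interest : String) (out : String) : Decidable (Spec_promptResponse prompt interest out) := by unfold Spec_promptResponse; infer_instance

-- ===== CLAIM (what is proved, stated in full; the proofs are below) =====
def Claim_equal_promptResponse : Prop := ∀ (prompt : String) (interest : String), Dom_promptResponse prompt interest → Spec_promptResponse prompt interest (promptResponse prompt interest)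

-- ===== LEMMAS AND PROOFS =====

-- the grouped buckets, written out (proof-side only)
def bucketBaby : List Product := pvCatalog.take 3
def bucketGames : List Product := (pvCatalog.drop 3).take 3
def bucketEnt : List Product := (pvCatalog.drop 6).take 3
def bucketLearn : List Product := (pvCatalog.drop 9).take 2
def bucketSeason : List Product := pvCatalog.drop 11

theorem lineA_eq_lineB : lineA = lineB := rfl

theorem pyCat_assoc (a b c : String) : pyCat (pyCat a b) c = pyCat a (pyCat b c) := by
  simp [pyCat, List.append_assoc]

theorem join_nil_str : PySem.Str.join "" [] = "" := by decide

theorem intercalate_nil_cons (x : List Char) (xs : List (List Char)) :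
    ([] : List Char).intercalate (x :: xs) = x ++ ([] : List Char).intercalate xs := by
  cases xs <;> simp [List.intercalate]

theorem join_cons_str (s : String) (l : List String) :
    PySem.Str.join "" (s :: l) = pyCat s (PySem.Str.join "" l) := by
  apply String.toList_inj.mp
  simp only [pyCat, PySem.Str.toList_join, String.toList_ofList, List.map_cons]
  rw [show ("" : String).toList = [] from rfl, PySem.Chars.join, intercalate_nil_cons,
    PySem.Chars.join]

theorem foldl_pyCat (f : Product → String) (l : List Product) (h : String) :
    l.foldl (fun r p => pyCat r (f p)) h = pyCat h (PySem.Str.join "" (l.map f)) := by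
  induction l generalizing h with
  | nil => simp [join_nil_str, pyCat, String.ofList_toList]
  | cons x xs ih => rw [List.map_cons, List.foldl_cons, ih, join_cons_str, ← pyCat_assoc]

-- the common tail of both ports, once the bucket is fixed
theorem tail_eq (l : List Product) (c : String) :
    (if !l.isEmpty then
        l.foldl (fun r p => pyCat r (lineA p))
          (pyCat (pyCat "Based on your interest in " c) ", we recommend:\n")
      else "Sorry, we couldn't find any products matching your interests.")
    = (if (l.map lineB).isEmpty then
        "Sorry, we couldn't find any products matching your interests."
      else
        pyCat (pyCat (pyCat "Based on your interest in " c) ", we recommend:\n")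
          (PySem.Str.join "" (l.map lineB))) := by
  cases l with
  | nil => simp
  | cons x xs =>
    simp only [List.isEmpty_cons, List.map_cons, Bool.not_false, if_true, Bool.false_eq_true,
      if_false, lineA_eq_lineB]
    rw [show ((x :: xs).foldl (fun r p => pyCat r (lineB p))
        (pyCat (pyCat "Based on your interest in " c) ", we recommend:\n"))
      = pyCat (pyCat (pyCat "Based on your interest in " c) ", we recommend:\n")
          (PySem.Str.join "" ((x :: xs).map lineB)) from foldl_pyCat lineB (x :: xs) _]
    rw [List.map_cons]

theorem branch_eq (prompt interest c : String) (bucket : List Product)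
    (hil : PySem.Str.lower interest = c)
    (hlc : PySem.Str.lower c = c)
    (hav : PySem.Set.contains
      (PySem.Set.ofList (pvCatalog.map (fun p => PySem.Str.lower p.category))) c = true)
    (hB : PySem.Dict.get? pvBuckets c = some bucket)
    (hA : ∀ m : Product → Bool,
      pvCatalog.filter (fun p => (c == PySem.Str.lower p.category) && m p) = bucket.filter m) :
    promptResponse prompt interest = promptResponse_alt prompt interest := by
  simp only [promptResponse, promptResponse_alt, hil, hlc, hav, hB, Bool.not_true,
    Bool.false_eq_true, if_false, PySem.List.foldl_append_if_eq_filter, List.nil_append]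
  rw [hA]
  exact tail_eq _ c

theorem miss_eq (prompt interest : String)
    (h1 : PySem.Str.lower interest ≠ "baby") (h2 : PySem.Str.lower interest ≠ "games")
    (h3 : PySem.Str.lower interest ≠ "entertainment") (h4 : PySem.Str.lower interest ≠ "learning")
    (h5 : PySem.Str.lower interest ≠ "seasonal") :
    promptResponse prompt interest = promptResponse_alt prompt interest := by
  have hset : PySem.Set.ofList (pvCatalog.map (fun p => PySem.Str.lower p.category))
      = ["baby", "games", "entertainment", "learning", "seasonal"] := by decide
  have hkeys : (PySem.Dict.keys pvBuckets)
      = ["baby", "games", "entertainment", "learning", "seasonal"] := by decide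
  have hcon : PySem.Set.contains
      (PySem.Set.ofList (pvCatalog.map (fun p => PySem.Str.lower p.category)))
      (PySem.Str.lower interest) = false := by
    rw [hset, Bool.eq_false_iff, Ne, PySem.Set.contains_iff]
    simp [h1, h2, h3, h4, h5]
  have hget : PySem.Dict.get? pvBuckets (PySem.Str.lower interest) = none := by
    rw [PySem.Dict.get?_eq_none_iff_not_mem_keys, hkeys]
    simp [h1, h2, h3, h4, h5]
  simp only [promptResponse, promptResponse_alt, hcon, hget, Bool.not_false, if_true]

theorem hA_baby : ∀ m : Product → Bool,
    pvCatalog.filter (fun p => ("baby" == PySem.Str.lower p.category) && m p)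
      = bucketBaby.filter m := by
  intro m
  have e1 : ("baby" == PySem.Str.lower "Baby") = true := by decide
  have e2 : ("baby" == PySem.Str.lower "Games") = false := by decide
  have e3 : ("baby" == PySem.Str.lower "Entertainment") = false := by decide
  have e4 : ("baby" == PySem.Str.lower "Learning") = false := by decide
  have e5 : ("baby" == PySem.Str.lower "Seasonal") = false := by decide
  simp [pvCatalog, bucketBaby, List.filter_cons, e1, e2, e3, e4, e5]

theorem hA_games : ∀ m : Product → Bool,
    pvCatalog.filter (fun p => ("games" == PySem.Str.lower p.category) && m p)
      = bucketGames.filter m := by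
  intro m
  have e1 : ("games" == PySem.Str.lower "Baby") = false := by decide
  have e2 : ("games" == PySem.Str.lower "Games") = true := by decide
  have e3 : ("games" == PySem.Str.lower "Entertainment") = false := by decide
  have e4 : ("games" == PySem.Str.lower "Learning") = false := by decide
  have e5 : ("games" == PySem.Str.lower "Seasonal") = false := by decide
  simp [pvCatalog, bucketGames, List.filter_cons, e1, e2, e3, e4, e5]

theorem hA_ent : ∀ m : Product → Bool,
    pvCatalog.filter (fun p => ("entertainment" == PySem.Str.lower p.category) && m p)
      = bucketEnt.filter m := by
  intro m
  have e1 : ("entertainment" == PySem.Str.lower "Baby") = false := by decide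
  have e2 : ("entertainment" == PySem.Str.lower "Games") = false := by decide
  have e3 : ("entertainment" == PySem.Str.lower "Entertainment") = true := by decide
  have e4 : ("entertainment" == PySem.Str.lower "Learning") = false := by decide
  have e5 : ("entertainment" == PySem.Str.lower "Seasonal") = false := by decide
  simp [pvCatalog, bucketEnt, List.filter_cons, e1, e2, e3, e4, e5]

theorem hA_learn : ∀ m : Product → Bool,
    pvCatalog.filter (fun p => ("learning" == PySem.Str.lower p.category) && m p)
      = bucketLearn.filter m := by
  intro m
  have e1 : ("learning" == PySem.Str.lower "Baby") = false := by decide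
  have e2 : ("learning" == PySem.Str.lower "Games") = false := by decide
  have e3 : ("learning" == PySem.Str.lower "Entertainment") = false := by decide
  have e4 : ("learning" == PySem.Str.lower "Learning") = true := by decide
  have e5 : ("learning" == PySem.Str.lower "Seasonal") = false := by decide
  simp [pvCatalog, bucketLearn, List.filter_cons, e1, e2, e3, e4, e5]

theorem hA_season : ∀ m : Product → Bool,
    pvCatalog.filter (fun p => ("seasonal" == PySem.Str.lower p.category) && m p)
      = bucketSeason.filter m := by
  intro m
  have e1 : ("seasonal" == PySem.Str.lower "Baby") = false := by decide
  have e2 : ("seasonal" == PySem.Str.lower "Games") = false := by decide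
  have e3 : ("seasonal" == PySem.Str.lower "Entertainment") = false := by decide
  have e4 : ("seasonal" == PySem.Str.lower "Learning") = false := by decide
  have e5 : ("seasonal" == PySem.Str.lower "Seasonal") = true := by decide
  simp [pvCatalog, bucketSeason, List.filter_cons, e1, e2, e3, e4, e5]

-- ===== VERDICT (by name: the statement is the Claim_ definition above) =====
theorem promptResponse_spec : Claim_equal_promptResponse := by
  intro prompt interest _
  unfold Spec_promptResponse
  by_cases h1 : PySem.Str.lower interest = "baby"
  · exact (branch_eq prompt interest "baby" bucketBaby h1 (by decide) (by decide) (by decide)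
      hA_baby)
  by_cases h2 : PySem.Str.lower interest = "games"
  · exact (branch_eq prompt interest "games" bucketGames h2 (by decide) (by decide) (by decide)
      hA_games)
  by_cases h3 : PySem.Str.lower interest = "entertainment"
  · exact (branch_eq prompt interest "entertainment" bucketEnt h3 (by decide) (by decide)
      (by decide) hA_ent)
  by_cases h4 : PySem.Str.lower interest = "learning"
  · exact (branch_eq prompt interest "learning" bucketLearn h4 (by decide) (by decide) (by decide)
      hA_learn)
  by_cases h5 : PySem.Str.lower interest = "seasonal"
  · exact (branch_eq prompt interest "seasonal" bucketSeason h5 (by decide) (by decide) (by decide)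
      hA_season)
  exact miss_eq prompt interest h1 h2 h3 h4 h5
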